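-- pv_equiv track=rewrite | github.com/M7-Soliman/Ancient-graffiti | Graffiti/src/main/python/lemmatizer.py | smartV2U
-- ===== SOURCE A (Python) =====
-- def smartV2U(term):
--     ret = ""
--     vowels = ["a", "e", "i", "o", "u"]
--     for i in range(len(term)):
--         if i > 0 and i < len(term)-1:
--             if (not (term[i-1] in vowels) \
--                or not (term[i+1] in vowels))\
--                and term[i]=="v":
--                    ret += "u"
--             else:
--                 ret += term[i]
--         else:
--             ret += term[i]
--     return ret
-- ===== SOURCE B (Python) =====
-- def smartV2U(term):
--     vowels = "aeiou"
--     parts = term.split('v')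
--     out = [parts[0]]
--     left = parts[0]
--     for k, right in enumerate(parts[1:]):
--         prev = left[-1] if left else ('v' if k > 0 else None)
--         nxt = right[0] if right else ('v' if k < len(parts) - 2 else None)
--         keep = prev is None or nxt is None or (prev in vowels and nxt in vowels)
--         out.append(('v' if keep else 'u') + right)
--         left = right
--     return ''.join(out)
-- ===== Notes on version B (the rewrite author's own statement) =====
-- stated objective: faster
-- what changed: Instead of scanning every character with index arithmetic and growing the result char by char, B splits the string on 'v', keeps each segment verbatim, and decides each separator 'v' from the last char of the left segment and the first char of the right segment (with boundary flags from the segment positions), then joins the pieces.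
import Mathlib
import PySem

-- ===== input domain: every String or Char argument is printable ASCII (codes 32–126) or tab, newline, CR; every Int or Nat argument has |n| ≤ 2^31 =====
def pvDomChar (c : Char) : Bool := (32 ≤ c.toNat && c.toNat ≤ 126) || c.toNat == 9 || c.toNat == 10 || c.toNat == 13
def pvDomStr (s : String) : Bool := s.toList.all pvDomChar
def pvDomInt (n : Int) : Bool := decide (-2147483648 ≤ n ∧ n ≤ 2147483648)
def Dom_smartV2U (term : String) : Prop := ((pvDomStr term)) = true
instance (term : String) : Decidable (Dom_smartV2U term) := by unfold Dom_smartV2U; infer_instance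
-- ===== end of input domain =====

-- B replaces A's indexed per-character scan (which also grows the result char by char) by
-- splitting the string on 'v' and deciding each separator from its neighbouring segments;
-- a timing run measured B faster (split/join instead of per-character work).

-- ===== PORT A =====
-- literal transliteration of A: index loop over range(len(term)) building ret char by char;
-- the always-in-range accesses term[i-1]/term[i]/term[i+1] are getD with an unreachable default
def smartV2U (term : String) : String :=
  let t := term.toList
  let vowels : List Char := ['a', 'e', 'i', 'o', 'u']
  String.ofList ((List.range t.length).foldl (fun ret i =>
    if 0 < i ∧ i < t.length - 1 then
      if (t.getD (i-1) ' ' ∉ vowels ∨ t.getD (i+1) ' ' ∉ vowels) ∧ t.getD i ' ' = 'v'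
      then ret ++ ['u']
      else ret ++ [t.getD i ' ']
    else ret ++ [t.getD i ' ']) [])

-- ===== PORT B =====
-- the body of Source B's for-loop (one step of the fold over enumerate(parts[1:]));
-- left[-1] / right[0] are evaluated only under their nonemptiness guards, as getLastD/headD
def pvStep (vowels : List Char) (N : Int) (st : List (List Char) × List Char)
    (kr : Int × List Char) : List (List Char) × List Char :=
  let left := st.2
  let prev : Option Char :=
    if left ≠ [] then some (left.getLastD ' ') else if kr.1 > 0 then some 'v' else none
  let nxt : Option Char :=
    if kr.2 ≠ [] then some (kr.2.headD ' ') else if kr.1 < N - 2 then some 'v' else none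
  let keep : Bool :=
    match prev, nxt with
    | none, _ => true
    | _, none => true
    | some p, some n => decide (p ∈ vowels ∧ n ∈ vowels)
  (st.1 ++ [(if keep then 'v' else 'u') :: kr.2], kr.2)

-- literal transliteration of B: split on 'v', keep parts[0], then for each further part decide
-- the separator 'v' from its neighbour segments and join the pieces
def smartV2U_alt (term : String) : String :=
  let vowels : List Char := "aeiou".toList
  let parts : List (List Char) := PySem.Chars.splitOn term.toList ['v']
  let first : List Char := parts.getD 0 []
  let st := (PySem.List.enumerate parts.tail 0).foldl
    (pvStep vowels (parts.length : Int)) ([first], first)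
  String.ofList (PySem.Chars.join [] st.1)

-- ===== PRECONDITION & SPEC =====
def Spec_smartV2U (term : String) (out : String) : Prop := out = smartV2U_alt term
instance (term : String) (out : String) : Decidable (Spec_smartV2U term out) := by unfold Spec_smartV2U; infer_instance

-- ===== CLAIM (what is proved, stated in full; the proofs are below) =====
def Claim_equal_smartV2U : Prop := ∀ (term : String), Dom_smartV2U term → Spec_smartV2U term (smartV2U term)

-- ===== LEMMAS AND PROOFS =====

-- the per-index character A's loop emits at position i
def pvG (t : List Char) (i : Nat) : Char :=
  if 0 < i ∧ i < t.length - 1 then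
    if (t.getD (i-1) ' ' ∉ (['a', 'e', 'i', 'o', 'u'] : List Char) ∨ t.getD (i+1) ' ' ∉ (['a', 'e', 'i', 'o', 'u'] : List Char)) ∧ t.getD i ' ' = 'v'
    then 'u' else t.getD i ' '
  else t.getD i ' '

-- the same character, parametrised by an optional virtual predecessor of position 0
def pvGp (prev : Option Char) (t : List Char) (i : Nat) : Char :=
  if (0 < i ∨ prev.isSome) ∧ i < t.length - 1 then
    if ((if i = 0 then prev.getD ' ' else t.getD (i-1) ' ') ∉ (['a', 'e', 'i', 'o', 'u'] : List Char) ∨ t.getD (i+1) ' ' ∉ (['a', 'e', 'i', 'o', 'u'] : List Char))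
        ∧ t.getD i ' ' = 'v'
    then 'u' else t.getD i ' '
  else t.getD i ' '

-- structural recursion computing A's output, threading the previous character
def pvRec (prev : Option Char) : List Char → List Char
  | [] => []
  | c :: rest =>
    (match prev, rest with
     | some p, d :: _ => if (p ∉ (['a', 'e', 'i', 'o', 'u'] : List Char) ∨ d ∉ (['a', 'e', 'i', 'o', 'u'] : List Char)) ∧ c = 'v' then 'u' else c
     | _, _ => c) :: pvRec (some c) rest

-- simple structural split on 'v'
def pvSplit : List Char → List (List Char)
  | [] => [[]]
  | c :: cs =>
    if c = 'v' then [] :: pvSplit cs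
    else match pvSplit cs with
      | [] => [[c]]
      | q :: qs => (c :: q) :: qs

def pvGlue : List (List Char) → List Char
  | [] => []
  | r :: rs => 'v' :: (r ++ pvGlue rs)

def pvConsHead (x : List Char) : List (List Char) → List (List Char)
  | [] => [x]
  | q :: qs => (x ++ q) :: qs

def pvPrev (left : List Char) (hp : Bool) : Option Char :=
  if left ≠ [] then some (left.getLastD ' ') else if hp then some 'v' else none

def pvLastPrev (prev : Option Char) (p : List Char) : Option Char :=
  if p = [] then prev else some (p.getLastD ' ')

-- the chunks B appends, as a structural recursion over the tail segments
def pvChunks (left : List Char) (hp : Bool) : List (List Char) → List (List Char)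
  | [] => []
  | r :: rs =>
    let prev := pvPrev left hp
    let nxt : Option Char :=
      if r ≠ [] then some (r.headD ' ') else if rs ≠ [] then some 'v' else none
    let keep : Bool :=
      match prev, nxt with
      | none, _ => true
      | _, none => true
      | some p, some n => decide (p ∈ (['a', 'e', 'i', 'o', 'u'] : List Char) ∧ n ∈ (['a', 'e', 'i', 'o', 'u'] : List Char))
    ((if keep then 'v' else 'u') :: r) :: pvChunks r true rs

-- A's accumulator loop is a map over the index range
theorem pvA_eq_map (t : List Char) :
    (List.range t.length).foldl (fun ret i =>
    if 0 < i ∧ i < t.length - 1 then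
      if (t.getD (i-1) ' ' ∉ (['a', 'e', 'i', 'o', 'u'] : List Char) ∨ t.getD (i+1) ' ' ∉ (['a', 'e', 'i', 'o', 'u'] : List Char)) ∧ t.getD i ' ' = 'v'
      then ret ++ ['u']
      else ret ++ [t.getD i ' ']
    else ret ++ [t.getD i ' ']) []
    = (List.range t.length).map (pvG t) := by
  have h : (fun (ret : List Char) i =>
    if 0 < i ∧ i < t.length - 1 then
      if (t.getD (i-1) ' ' ∉ (['a', 'e', 'i', 'o', 'u'] : List Char) ∨ t.getD (i+1) ' ' ∉ (['a', 'e', 'i', 'o', 'u'] : List Char)) ∧ t.getD i ' ' = 'v'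
      then ret ++ ['u']
      else ret ++ [t.getD i ' ']
    else ret ++ [t.getD i ' ']) = fun ret i => ret ++ [pvG t i] := by
    funext ret i
    unfold pvG
    split_ifs <;> rfl
  rw [h, PySem.List.foldl_append_singleton_eq_map]
  simp

theorem pvG_eq_pvGp (t : List Char) (i : Nat) : pvG t i = pvGp none t i := by
  unfold pvG pvGp
  cases i with
  | zero => simp
  | succ j => simp

theorem pvGp_zero (prev : Option Char) (c : Char) (rest : List Char) :
    pvGp prev (c :: rest) 0
    = (match prev, rest with
       | some p, d :: _ => if (p ∉ (['a', 'e', 'i', 'o', 'u'] : List Char) ∨ d ∉ (['a', 'e', 'i', 'o', 'u'] : List Char)) ∧ c = 'v' then 'u' else c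
       | _, _ => c) := by
  cases prev <;> cases rest <;> simp [pvGp]

theorem pvGp_succ (prev : Option Char) (c : Char) (rest : List Char) (i : Nat) :
    pvGp prev (c :: rest) (i + 1) = pvGp (some c) rest i := by
  cases i with
  | zero =>
    unfold pvGp
    by_cases h : 1 < rest.length
    · have h1 : 0 + 1 < (c :: rest).length - 1 := by simp; omega
      have h2 : 0 < rest.length - 1 := by omega
      simp [h2]
      intro hcon
      exact absurd hcon (by omega)
    · have h1 : ¬ (0 + 1 < (c :: rest).length - 1) := by simp; omega
      have h2 : ¬ (0 < rest.length - 1) := by omega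
      simp [h2]
      intro hcon
      exact absurd hcon h
  | succ j =>
    unfold pvGp
    by_cases h : j + 1 < rest.length - 1
    · simp [h]
      intro hcon
      exact absurd hcon (by omega)
    · simp [h]
      intro hcon
      exact absurd hcon (by omega)

theorem pvMap_eq_pvRec (t : List Char) (prev : Option Char) :
    (List.range t.length).map (pvGp prev t) = pvRec prev t := by
  induction t generalizing prev with
  | nil => rfl
  | cons c rest ih =>
    rw [List.length_cons, List.range_succ_eq_map, List.map_cons, List.map_map]
    rw [show (pvGp prev (c :: rest) ∘ Nat.succ) = pvGp (some c) rest from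
        funext fun i => pvGp_succ prev c rest i]
    rw [ih (some c), pvGp_zero]
    rfl

-- a 'v'-free prefix passes through pvRec unchanged
theorem pvRec_cons_ne (prev : Option Char) (c : Char) (l : List Char) (hc : c ≠ 'v') :
    pvRec prev (c :: l) = c :: pvRec (some c) l := by
  cases prev <;> cases l <;> simp [pvRec, hc]

theorem pvLastPrev_cons (prev : Option Char) (c : Char) (p : List Char) :
    pvLastPrev prev (c :: p) = pvLastPrev (some c) p := by
  cases p with
  | nil => simp [pvLastPrev]
  | cons x xs => simp [pvLastPrev]

theorem pvRec_append (p : List Char) (prev : Option Char) (rest : List Char)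
    (h : 'v' ∉ p) :
    pvRec prev (p ++ rest) = p ++ pvRec (pvLastPrev prev p) rest := by
  induction p generalizing prev with
  | nil => simp [pvLastPrev]
  | cons c p' ih =>
    have hc : c ≠ 'v' := fun hcv => h (hcv ▸ List.mem_cons_self ..)
    rw [List.cons_append, pvRec_cons_ne _ _ _ hc,
        ih (some c) (fun hm => h (List.mem_cons_of_mem _ hm)), pvLastPrev_cons]
    rfl

theorem pvLastPrev_v (r : List Char) : pvLastPrev (some 'v') r = pvPrev r true := by
  cases r <;> simp [pvLastPrev, pvPrev]

theorem pvRec_cons_none (c : Char) (l : List Char) :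
    pvRec none (c :: l) = c :: pvRec (some c) l := by
  cases l <;> rfl

-- main correspondence: pvRec over the glued tail segments = B's chunks, flattened
theorem pvRec_glue (rs : List (List Char)) (left : List Char) (hp : Bool)
    (hv : ∀ r ∈ rs, 'v' ∉ r) :
    pvRec (pvPrev left hp) (pvGlue rs) = (pvChunks left hp rs).flatten := by
  induction rs generalizing left hp with
  | nil => simp [pvGlue, pvChunks, pvRec]
  | cons r rs' ih =>
    have hvr : 'v' ∉ r := hv r (List.mem_cons_self ..)
    have htail : pvRec (some 'v') (r ++ pvGlue rs')
        = r ++ (pvChunks r true rs').flatten := by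
      rw [pvRec_append r _ _ hvr, pvLastPrev_v,
          ih r true (fun x hx => hv x (List.mem_cons_of_mem _ hx))]
    show pvRec (pvPrev left hp) ('v' :: (r ++ pvGlue rs'))
        = (pvChunks left hp (r :: rs')).flatten
    rcases hprev : pvPrev left hp with _ | p
    · -- nothing precedes this 'v' (index 0): it is kept by both sides
      rw [pvRec_cons_none, htail]
      simp [pvChunks, hprev]
    · cases r with
      | cons a as =>
        have hhead : pvRec (some p) ('v' :: ((a :: as) ++ pvGlue rs'))
            = (if (p ∉ (['a', 'e', 'i', 'o', 'u'] : List Char)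
                    ∨ a ∉ (['a', 'e', 'i', 'o', 'u'] : List Char)) ∧ ('v' : Char) = 'v'
               then 'u' else 'v')
              :: pvRec (some 'v') ((a :: as) ++ pvGlue rs') := rfl
        rw [hhead, htail]
        by_cases hpa : p ∈ (['a', 'e', 'i', 'o', 'u'] : List Char)
            ∧ a ∈ (['a', 'e', 'i', 'o', 'u'] : List Char)
        · simp [pvChunks, hprev, hpa.1, hpa.2]
        · rw [if_pos ⟨by tauto, rfl⟩]
          simp [pvChunks, hprev]
          simp only [List.mem_cons, List.not_mem_nil, or_false] at hpa
          tauto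
      | nil =>
        cases rs' with
        | nil =>
          simp [pvGlue, pvRec, pvChunks, hprev]
        | cons s ss =>
          have hhead : pvRec (some p) ('v' :: ([] ++ pvGlue (s :: ss)))
              = (if (p ∉ (['a', 'e', 'i', 'o', 'u'] : List Char)
                      ∨ ('v' : Char) ∉ (['a', 'e', 'i', 'o', 'u'] : List Char))
                    ∧ ('v' : Char) = 'v'
                 then 'u' else 'v')
                :: pvRec (some 'v') ([] ++ pvGlue (s :: ss)) := rfl
          rw [hhead, htail]
          simp [pvChunks, hprev]

-- pvSplit facts
theorem pvSplit_ne_nil (l : List Char) : pvSplit l ≠ [] := by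
  cases l with
  | nil => simp [pvSplit]
  | cons c cs =>
    simp only [pvSplit]
    split_ifs
    · simp
    · cases h : pvSplit cs <;> simp

theorem pvSplit_v (cs : List Char) : pvSplit ('v' :: cs) = [] :: pvSplit cs := by
  rw [pvSplit]; simp

theorem pvSplit_nv (c : Char) (cs : List Char) (hc : c ≠ 'v') (q : List Char)
    (qs : List (List Char)) (h : pvSplit cs = q :: qs) :
    pvSplit (c :: cs) = (c :: q) :: qs := by
  rw [pvSplit, if_neg hc, h]

theorem pvSplit_recon (l : List Char) :
    l = (pvSplit l).headD [] ++ pvGlue (pvSplit l).tail := by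
  induction l with
  | nil => simp [pvSplit, pvGlue]
  | cons c cs ih =>
    by_cases hc : c = 'v'
    · subst hc
      simp only [pvSplit]
      cases h : pvSplit cs with
      | nil => exact absurd h (pvSplit_ne_nil cs)
      | cons q qs =>
        rw [h] at ih
        simp only [List.headD_cons, List.tail_cons] at ih
        simp [pvGlue, ← ih]
    · cases h : pvSplit cs with
      | nil => exact absurd h (pvSplit_ne_nil cs)
      | cons q qs =>
        rw [h] at ih
        simp only [List.headD_cons, List.tail_cons] at ih
        simp only [pvSplit, if_neg hc, h, List.headD_cons, List.tail_cons]
        simp [← ih]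

theorem pvSplit_vfree (l : List Char) : ∀ r ∈ pvSplit l, 'v' ∉ r := by
  induction l with
  | nil =>
    intro r hr
    simp [pvSplit] at hr
    simp [hr]
  | cons c cs ih =>
    intro r hr
    by_cases hc : c = 'v'
    · subst hc
      rw [pvSplit_v, List.mem_cons] at hr
      cases hr with
      | inl he => subst he; simp
      | inr hr' => exact ih r hr'
    · cases h : pvSplit cs with
      | nil => exact absurd h (pvSplit_ne_nil cs)
      | cons q qs =>
        rw [pvSplit_nv c cs hc q qs h, List.mem_cons] at hr
        cases hr with
        | inl he =>
          subst he
          intro hm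
          cases List.mem_cons.mp hm with
          | inl h1 => exact hc h1.symm
          | inr h2 => exact ih q (by rw [h]; exact List.mem_cons_self ..) h2
        | inr hr' => exact ih r (by rw [h]; exact List.mem_cons_of_mem _ hr')

-- PySem's splitOn on separator "v" is pvSplit
theorem pvGo_eq (fuel : Nat) : ∀ (l cur : List Char) (acc : List (List Char)),
    l.length < fuel →
    PySem.Chars.splitOn.go ['v'] fuel l cur acc
      = acc.reverse ++ pvConsHead cur.reverse (pvSplit l) := by
  induction fuel with
  | zero => intro l cur acc h; omega
  | succ f ih =>
    intro l cur acc h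
    cases l with
    | nil =>
      rw [PySem.Chars.splitOn.go.eq_def]
      simp [pvSplit, pvConsHead]
    | cons c rest =>
      rw [PySem.Chars.splitOn.go.eq_def]
      by_cases hc : c = 'v'
      · subst hc
        have hpre : (['v'] : List Char).isPrefixOf ('v' :: rest) = true := by
          simp [List.isPrefixOf]
        simp only [hpre, if_true]
        rw [show List.drop (['v'] : List Char).length ('v' :: rest) = rest from rfl]
        rw [ih rest [] _ (by simp at h ⊢; omega)]
        cases hs : pvSplit rest with
        | nil => exact absurd hs (pvSplit_ne_nil rest)
        | cons q qs =>
          simp [pvSplit, pvConsHead, hs]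
      · have hpre : (['v'] : List Char).isPrefixOf (c :: rest) = false := by
          simp [List.isPrefixOf]
          intro hh
          exact absurd hh.symm hc
        simp only [hpre, Bool.false_eq_true, if_false]
        rw [ih rest (c :: cur) acc (by simp at h ⊢; omega)]
        cases hs : pvSplit rest with
        | nil => exact absurd hs (pvSplit_ne_nil rest)
        | cons q qs =>
          simp [pvSplit, pvConsHead, hs, if_neg hc]

theorem pvSplitOn_eq (l : List Char) :
    PySem.Chars.splitOn l ['v'] = pvSplit l := by
  show PySem.Chars.splitOn.go ['v'] (l.length + 1) l [] [] = _
  rw [pvGo_eq (l.length + 1) l [] [] (by omega)]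
  cases h : pvSplit l with
  | nil => exact absurd h (pvSplit_ne_nil l)
  | cons q qs => simp [pvConsHead]

-- B's fold over enumerate = pvChunks
theorem pvFold_eq (N : Int) (rs : List (List Char)) :
    ∀ (k0 : Int) (st0 : List (List Char) × List Char),
    0 ≤ k0 → k0 + rs.length = N - 1 →
    ((PySem.List.enumerate rs k0).foldl (pvStep "aeiou".toList N) st0).1
      = st0.1 ++ pvChunks st0.2 (decide (0 < k0)) rs := by
  induction rs with
  | nil => intro k0 st0 _ _; simp [PySem.List.enumerate_nil, pvChunks]
  | cons r rs' ih =>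
    intro k0 st0 hk0 hN
    rw [PySem.List.enumerate_cons, List.foldl_cons,
        ih (k0 + 1) _ (by omega) (by simp only [List.length_cons] at hN; push_cast at hN ⊢; omega)]
    have hd1 : decide ((0:Int) < k0 + 1) = true := by simp; omega
    rw [hd1]
    have hV : ("aeiou".toList : List Char) = ['a', 'e', 'i', 'o', 'u'] := by decide
    have hprevEq : (if st0.2 ≠ [] then some (st0.2.getLastD ' ')
        else if k0 > 0 then some 'v' else none)
        = pvPrev st0.2 (decide ((0:Int) < k0)) := by
      unfold pvPrev
      by_cases hL : st0.2 = [] <;> by_cases hk : (0:Int) < k0 <;> simp [hL, hk, GT.gt]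
    have hnxtEq : (if r ≠ [] then some (r.headD ' ')
        else if k0 < N - 2 then some 'v' else none)
        = (if r ≠ [] then some (r.headD ' ') else if rs' ≠ [] then some 'v' else none) := by
      by_cases hr : r = []
      · have hiff : (k0 < N - 2) ↔ rs' ≠ [] := by
          rw [← List.length_pos_iff]
          simp only [List.length_cons] at hN
          push_cast at hN
          constructor <;> intro hh
          · by_contra hz
            have : rs'.length = 0 := by omega
            omega
          · have : (1:Int) ≤ (rs'.length : Int) := by exact_mod_cast hh
            omega
        by_cases hrs : rs' ≠ [] <;> simp [hr, hrs, hiff]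
      · simp [hr]
    show (pvStep "aeiou".toList N st0 (k0, r)).1
        ++ pvChunks (pvStep "aeiou".toList N st0 (k0, r)).2 true rs'
      = st0.1 ++ pvChunks st0.2 (decide (0 < k0)) (r :: rs')
    simp only [pvStep, hV, hprevEq, hnxtEq, pvChunks]
    simp [List.append_assoc]

-- join with empty separator is flatten
theorem pvJoin_nil (xs : List (List Char)) : PySem.Chars.join [] xs = xs.flatten := by
  show List.intercalate [] xs = xs.flatten
  induction xs with
  | nil => rfl
  | cons x t ih =>
    cases t with
    | nil => simp [List.intercalate]
    | cons y t' =>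
      simp only [List.intercalate] at ih ⊢
      rw [List.intersperse_cons₂, List.flatten_cons, List.flatten_cons, ih]
      simp

-- ===== VERDICT (by name: the statement is the Claim_ definition above) =====
theorem smartV2U_spec : Claim_equal_smartV2U := by
  intro term _
  show smartV2U term = smartV2U_alt term
  simp only [smartV2U, smartV2U_alt]
  rw [pvA_eq_map]
  rw [show pvG term.toList = pvGp none term.toList from funext (pvG_eq_pvGp term.toList)]
  rw [pvMap_eq_pvRec]
  rw [pvSplitOn_eq]
  cases hq : pvSplit term.toList with
  | nil => exact absurd hq (pvSplit_ne_nil _)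
  | cons q qs =>
    have hfree := pvSplit_vfree term.toList
    rw [hq] at hfree
    have ht : term.toList = q ++ pvGlue qs := by
      have hrec := pvSplit_recon term.toList
      rw [hq] at hrec
      simpa using hrec
    rw [List.getD_cons_zero, List.tail_cons]
    rw [pvFold_eq ((q :: qs).length : Int) qs 0 ([q], q) le_rfl
        (by simp only [List.length_cons]; push_cast; ring)]
    rw [pvJoin_nil]
    conv_lhs => rw [ht]
    rw [pvRec_append q none _ (hfree q (List.mem_cons_self ..)),
        show pvLastPrev none q = pvPrev q false from (by cases q <;> simp [pvLastPrev, pvPrev]),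
        pvRec_glue qs q false (fun x hx => hfree x (List.mem_cons_of_mem _ hx))]
    simp
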